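-- pv_equiv track=rewrite | github.com/pypi-data/pypi-mirror-218 | packages/pyckett/pyckett-0.1.9.tar.gz/pyckett-0.1.9/pyckett/pyckett.py | parse_param_id
-- ===== SOURCE A (Python) =====
-- def get_par_digits(vib_digits):
-- 	return({
-- 		'v1': vib_digits,
-- 		'v2': vib_digits,
-- 		'NSQ': 1,
-- 		'KSQ': 1,
-- 		'TYP': 2,
-- 		'NS': 1,
-- 		'I1': 1,
-- 		'I2': 1,
-- 		'FF': 2,
-- 		'EX': 1,
-- 	})
--
-- def parse_param_id(tmp, vib_digits):
-- 	tmp = abs(tmp)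
-- 	result = {}
-- 	for label, digits in get_par_digits(vib_digits).items():
-- 		if digits == 0:
-- 			continue
-- 		tmp, result[label] = divmod(tmp, 10**digits)
-- 	return(result)
-- ===== SOURCE B (Python) =====
-- def get_par_digits(vib_digits):
-- 	return({
-- 		'v1': vib_digits,
-- 		'v2': vib_digits,
-- 		'NSQ': 1,
-- 		'KSQ': 1,
-- 		'TYP': 2,
-- 		'NS': 1,
-- 		'I1': 1,
-- 		'I2': 1,
-- 		'FF': 2,
-- 		'EX': 1,
-- 	})
--
-- def parse_param_id(tmp, vib_digits):
-- 	# decompose |tmp| into its base-10 digit list once, then slice digit groups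
-- 	t = abs(tmp)
-- 	ds = []
-- 	while t:
-- 		t, d = divmod(t, 10)
-- 		ds.append(d)
-- 	result = {}
-- 	pos = 0
-- 	for label, nd in get_par_digits(vib_digits).items():
-- 		if nd == 0:
-- 			continue
-- 		v = 0
-- 		for d in reversed(ds[pos:pos + nd]):
-- 			v = v * 10 + d
-- 		result[label] = v
-- 		pos += nd
-- 	return result
-- ===== Notes on version B (the rewrite author's own statement) =====
-- stated objective: faster
-- what changed: B explodes |tmp| into its base-10 digit list once and builds each field by slicing a digit group and recombining it by Horner's rule, instead of A's divmod loop threading a shrinking accumulator; B never constructs the huge integers 10**vib_digits and tmp//10**…, so it is measurably faster for large vib_digits.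
import Mathlib
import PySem

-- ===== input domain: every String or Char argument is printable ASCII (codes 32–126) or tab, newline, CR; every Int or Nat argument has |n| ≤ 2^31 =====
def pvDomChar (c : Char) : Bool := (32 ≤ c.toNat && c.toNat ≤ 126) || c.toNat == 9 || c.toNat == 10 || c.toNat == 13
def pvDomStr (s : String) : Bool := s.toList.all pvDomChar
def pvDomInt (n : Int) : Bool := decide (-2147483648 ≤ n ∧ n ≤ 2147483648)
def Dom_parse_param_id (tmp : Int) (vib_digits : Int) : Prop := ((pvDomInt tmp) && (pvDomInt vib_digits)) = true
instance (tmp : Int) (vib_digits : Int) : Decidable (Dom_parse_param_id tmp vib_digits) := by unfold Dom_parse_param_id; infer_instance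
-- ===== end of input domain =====

-- B explodes |tmp| into its base-10 digit list once, then builds each field by slicing a digit
-- group and recombining it by Horner's rule, never forming the large powers 10**digits —
-- measured faster for large vib_digits; equivalence proved for 0 ≤ vib_digits (Pre_).

-- ===== PORT A =====
-- dict literal of the helper get_par_digits, as an insertion-ordered association list
def get_par_digits (vib_digits : Int) : List (String × Int) :=
  [("v1", vib_digits), ("v2", vib_digits), ("NSQ", 1), ("KSQ", 1), ("TYP", 2),
   ("NS", 1), ("I1", 1), ("I2", 1), ("FF", 2), ("EX", 1)]

-- 10**digits is ported as (10 : Int) ^ digits.toNat: exact for 0 ≤ digits, which Pre_ ensures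
-- (in Python a negative exponent yields a float, excluded by Pre_).
def parse_param_id (tmp : Int) (vib_digits : Int) : List (String × Int) :=
  let t := |tmp|
  let st := (get_par_digits vib_digits).foldl
    (fun (st : Int × PySem.Dict String Int) p =>
      if p.2 == 0 then st
      else (PySem.Int.floordiv st.1 ((10 : Int) ^ p.2.toNat),
            st.2.insert p.1 (PySem.Int.mod st.1 ((10 : Int) ^ p.2.toNat))))
    (t, PySem.Dict.empty)
  st.2.items

-- ===== PORT B =====
-- the 'while t: t, d = divmod(t, 10); ds.append(d)' loop of Source B; t = abs(tmp) ≥ 0, so the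
-- recursion runs on the natural number tmp.natAbs with Python's exact divmod-by-10 steps
def pvDigits (t : Nat) : List Int :=
  if h : t = 0 then [] else ((t % 10 : Nat) : Int) :: pvDigits (t / 10)
decreasing_by exact Nat.div_lt_self (Nat.pos_of_ne_zero h) (by norm_num)

def parse_param_id_alt (tmp : Int) (vib_digits : Int) : List (String × Int) :=
  let ds := pvDigits tmp.natAbs
  let st := (get_par_digits vib_digits).foldl
    (fun (st : Int × PySem.Dict String Int) p =>
      if p.2 == 0 then st
      else
        let chunk := PySem.List.slice ds (some st.1) (some (st.1 + p.2))
        let v := chunk.reverse.foldl (fun a d => a * 10 + d) 0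
        (st.1 + p.2, st.2.insert p.1 v))
    ((0 : Int), PySem.Dict.empty)
  st.2.items

-- ===== PRECONDITION & SPEC =====
-- Pre_ excludes vib_digits < 0, on which A's 10**vib_digits is a float and A returns a dict
-- of floats — not values of the declared int type.
def Pre_parse_param_id (tmp : Int) (vib_digits : Int) : Prop := 0 ≤ vib_digits
instance (tmp : Int) (vib_digits : Int) : Decidable (Pre_parse_param_id tmp vib_digits) := by unfold Pre_parse_param_id; infer_instance
def pvWitness_parse_param_id : Int × Int := (123456789, 2)

def Spec_parse_param_id (tmp : Int) (vib_digits : Int) (out : List (String × Int)) : Prop := out = parse_param_id_alt tmp vib_digits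
instance (tmp : Int) (vib_digits : Int) (out : List (String × Int)) : Decidable (Spec_parse_param_id tmp vib_digits out) := by unfold Spec_parse_param_id; infer_instance

-- ===== CLAIM (what is proved, stated in full; the proofs are below) =====
def Claim_equal_parse_param_id : Prop := ∀ (tmp : Int) (vib_digits : Int), Dom_parse_param_id tmp vib_digits → Pre_parse_param_id tmp vib_digits → Spec_parse_param_id tmp vib_digits (parse_param_id tmp vib_digits)

-- ===== LEMMAS AND PROOFS =====

-- the digit list's tail drops the least significant digit
theorem pvDigits_tail (t : Nat) : (pvDigits t).drop 1 = pvDigits (t / 10) := by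
  rw [pvDigits]
  by_cases h : t = 0
  · subst h; simp [pvDigits]
  · simp [h]

theorem pvDigits_drop (t k : Nat) : (pvDigits t).drop k = pvDigits (t / 10 ^ k) := by
  induction k generalizing t with
  | zero => simp
  | succ k ih =>
    have : (pvDigits t).drop (k + 1) = ((pvDigits t).drop 1).drop k := by
      rw [List.drop_drop]; ring_nf
    rw [this, pvDigits_tail, ih, Nat.div_div_eq_div_mul, pow_succ]
    ring_nf

-- Horner recombination of the first n digits is t mod 10^n
theorem pvDigits_take_val (n : Nat) : ∀ (t : Nat),
    ((pvDigits t).take n).reverse.foldl (fun a d => a * 10 + d) 0 = ((t % 10 ^ n : Nat) : Int) := by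
  induction n with
  | zero => intro t; simp
  | succ n ih =>
    intro t
    by_cases h : t = 0
    · subst h; simp [pvDigits]
    · rw [pvDigits]; simp only [h, dite_false]
      rw [List.take_succ_cons, List.reverse_cons, List.foldl_append, ih (t / 10)]
      simp only [List.foldl_cons, List.foldl_nil]
      have : t % 10 ^ (n + 1) = t % 10 + 10 * (t / 10 % 10 ^ n) := by
        rw [pow_succ', Nat.mod_mul]
      rw [this]; push_cast; ring

-- the value B reads from a slice equals A's (t // 10^off) % 10^nd
theorem pv_chunk_val (N : Nat) (off nd : Int) (hoff : 0 ≤ off) (hnd : 0 < nd) :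
    ((PySem.List.slice (pvDigits N) (some off) (some (off + nd))).reverse.foldl
        (fun a d => a * 10 + d) 0)
      = PySem.Int.mod (PySem.Int.floordiv (N : Int) ((10 : Int) ^ off.toNat)) ((10 : Int) ^ nd.toNat) := by
  rw [PySem.List.slice_toNat _ hoff (by omega)]
  have hsub : (off + nd).toNat - off.toNat = nd.toNat := by omega
  rw [hsub, pvDigits_drop, pvDigits_take_val]
  have h10 : ((10 : Int) ^ off.toNat) = ((10 ^ off.toNat : Nat) : Int) := by push_cast; ring
  have h10' : ((10 : Int) ^ nd.toNat) = ((10 ^ nd.toNat : Nat) : Int) := by push_cast; ring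
  rw [h10, h10', PySem.Int.floordiv_natCast, PySem.Int.mod_natCast]

-- Loop invariant: A's threaded tmp equals N // 10^off for B's running offset off.
theorem pv_loop_eq (l : List (String × Int)) (hl : ∀ p ∈ l, 0 ≤ p.2)
    (N : Nat) (off : Int) (hoff : 0 ≤ off) (acc : PySem.Dict String Int) :
    (l.foldl
      (fun (st : Int × PySem.Dict String Int) p =>
        if p.2 == 0 then st
        else (PySem.Int.floordiv st.1 ((10 : Int) ^ p.2.toNat),
              st.2.insert p.1 (PySem.Int.mod st.1 ((10 : Int) ^ p.2.toNat))))
      (PySem.Int.floordiv (N : Int) ((10 : Int) ^ off.toNat), acc)).2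
    = (l.foldl
      (fun (st : Int × PySem.Dict String Int) p =>
        if p.2 == 0 then st
        else (st.1 + p.2,
              st.2.insert p.1
                ((PySem.List.slice (pvDigits N) (some st.1) (some (st.1 + p.2))).reverse.foldl
                  (fun a d => a * 10 + d) 0)))
      (off, acc)).2 := by
  induction l generalizing off acc with
  | nil => rfl
  | cons p rest ih =>
    simp only [List.foldl_cons]
    by_cases h0 : p.2 = 0
    · have h0' : (p.2 == 0) = true := by simpa using h0
      simp only [h0', if_true]
      exact ih (fun q hq => hl q (List.mem_cons_of_mem _ hq)) off hoff acc
    · have hd : 0 ≤ p.2 := hl p (List.mem_cons_self ..)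
      have hdpos : 0 < p.2 := lt_of_le_of_ne hd (Ne.symm h0)
      have h0' : (p.2 == 0) = false := by simpa using h0
      simp only [h0', Bool.false_eq_true, if_false]
      have hstep : PySem.Int.floordiv (PySem.Int.floordiv (N : Int) ((10 : Int) ^ off.toNat)) ((10 : Int) ^ p.2.toNat)
          = PySem.Int.floordiv (N : Int) ((10 : Int) ^ (off + p.2).toNat) := by
        have h1 : (0:Int) < (10 : Int) ^ off.toNat := by positivity
        have h2 : (0:Int) < (10 : Int) ^ p.2.toNat := by positivity
        rw [PySem.Int.floordiv_eq_ediv_of_pos h1, PySem.Int.floordiv_eq_ediv_of_pos h2,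
            PySem.Int.floordiv_eq_ediv_of_pos (by positivity),
            Int.ediv_ediv_of_nonneg (le_of_lt h1), ← pow_add, Int.toNat_add hoff hd]
      rw [hstep, ← pv_chunk_val N off p.2 hoff hdpos]
      exact ih (fun q hq => hl q (List.mem_cons_of_mem _ hq)) (off + p.2) (by omega) _

-- ===== VERDICT (by name: the statement is the Claim_ definition above) =====
theorem parse_param_id_spec : Claim_equal_parse_param_id := by
  intro tmp vib_digits _hdom hpre
  unfold Spec_parse_param_id
  have hl : ∀ p ∈ get_par_digits vib_digits, 0 ≤ p.2 := by
    intro p hp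
    unfold get_par_digits at hp
    simp only [List.mem_cons, List.not_mem_nil, or_false] at hp
    rcases hp with rfl|rfl|rfl|rfl|rfl|rfl|rfl|rfl|rfl|rfl
    all_goals first | exact hpre | norm_num
  have h := pv_loop_eq (get_par_digits vib_digits) hl tmp.natAbs 0 le_rfl PySem.Dict.empty
  rw [show PySem.Int.floordiv (tmp.natAbs : Int) ((10:Int) ^ (0:Int).toNat) = |tmp| by
        rw [PySem.Int.floordiv_eq_ediv_of_pos (by norm_num)]
        simp] at h
  simp only [parse_param_id, parse_param_id_alt]
  rw [h]
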